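-- pv_equiv track=rewrite | github.com/yumiao20071126/AWorld | aworld/trace/server/util.py | _get_top_task_nodes
-- ===== SOURCE A (Python) =====
-- def _get_top_task_nodes(spans_dict):
--     task_nodes = [
--         span for span in spans_dict.values()
--         if span.get('name', '').startswith('task.')
--     ]
--     top_task_nodes = []
--     for task_node in task_nodes:
--         parent_id = task_node.get('parent_id')
--         is_top = True
--
--         while parent_id:
--             parent_span = spans_dict.get(parent_id)
--             if not parent_span:
--                 break
--
--             if parent_span.get('name', '').startswith('task.'):
--                 is_top = False
--                 break
--
--             parent_id = parent_span.get('parent_id')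
--
--         if is_top:
--             top_task_nodes.append(task_node)
--
--     return top_task_nodes
-- ===== SOURCE B (Python) =====
-- def _get_top_task_nodes(spans_dict):
--     # Memoized: cache[sid] = True iff the chain starting AT sid (inclusive) reaches a task span.
--     cache = {}
--
--     def reaches_task(pid):
--         path = []
--         while pid and pid in spans_dict and pid not in cache:
--             span = spans_dict[pid]
--             if span.get('name', '').startswith('task.'):
--                 res = True
--                 break
--             path.append(pid)
--             pid = span.get('parent_id')
--         else:
--             res = cache.get(pid, False)
--         for q in path:
--             cache[q] = res
--         return res
--
--     return [
--         span for span in spans_dict.values()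
--         if span.get('name', '').startswith('task.')
--         and not reaches_task(span.get('parent_id'))
--     ]
-- ===== Notes on version B (the rewrite author's own statement) =====
-- stated objective: alternative
-- what changed: Instead of re-walking the whole parent chain independently for every task span, B memoizes 'this span's chain reaches a task span' in a dict and fills it along each walked path, trading the repeated chain re-walks for a shared cache.
import Mathlib
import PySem

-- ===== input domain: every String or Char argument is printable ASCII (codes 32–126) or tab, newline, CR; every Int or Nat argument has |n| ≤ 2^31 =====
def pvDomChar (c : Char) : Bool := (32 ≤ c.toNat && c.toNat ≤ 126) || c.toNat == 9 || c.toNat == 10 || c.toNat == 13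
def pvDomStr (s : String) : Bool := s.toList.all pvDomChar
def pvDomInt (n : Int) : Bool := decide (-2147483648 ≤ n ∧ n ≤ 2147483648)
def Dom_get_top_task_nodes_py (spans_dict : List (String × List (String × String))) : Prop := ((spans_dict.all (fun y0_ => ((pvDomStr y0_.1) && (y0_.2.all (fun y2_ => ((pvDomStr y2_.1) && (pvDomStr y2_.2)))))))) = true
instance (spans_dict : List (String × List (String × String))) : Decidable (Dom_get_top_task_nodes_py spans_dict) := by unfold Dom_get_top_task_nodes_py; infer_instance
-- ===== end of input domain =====

-- B replaces A's independent per-task-node re-walks of the parent chain by memoized walks sharing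
-- a cache of "this span's chain reaches a task span", filled along each walked path (alternative strategy).
-- Equivalence is proved on Pre_, which excludes exactly the inputs on which A's parent walk cycles forever.

-- ===== PORT A =====
-- shared input shaping: the Python argument is a dict of dicts
def pvDictify (spans_dict : List (String × List (String × String))) :
    PySem.Dict String (PySem.Dict String String) :=
  PySem.Dict.ofList (spans_dict.map (fun kv => (kv.1, PySem.Dict.ofList kv.2)))

-- span.get('name', '').startswith('task.')
def pvIsTask (sp : PySem.Dict String String) : Bool :=
  PySem.Str.startswith (sp.getD "name" "") "task."

-- A's while loop (returns is_top); fuel makes the loop structural — the Python loop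
-- terminates on every input admitted by Pre_ within this fuel
def pvWalkA (d : PySem.Dict String (PySem.Dict String String)) :
    Nat → Option String → Bool
  | 0, _ => true
  | f + 1, pid =>
    match pid with
    | none => true                       -- while parent_id: falsy → loop ends, is_top stays True
    | some s =>
      if s = "" then true
      else
        match d.get? s with
        | none => true                   -- if not parent_span: break
        | some sp =>
          if pvIsTask sp then false      -- is_top = False; break
          else pvWalkA d f (sp.get? "parent_id")

def get_top_task_nodes_py (spans_dict : List (String × List (String × String))) :
    List (List (String × String)) :=
  -- task_nodes = the comprehension's filter; the for loop appends (as its items list) each top node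
  ((pvDictify spans_dict).values.filter (fun sp => pvIsTask sp)).foldl
    (fun acc t =>
      if pvWalkA (pvDictify spans_dict) (spans_dict.length + 2) (t.get? "parent_id") then
        acc ++ [t.items]
      else acc) []

-- ===== PORT B =====
-- 'for q in path: cache[q] = res'
def pvCommit (path : List String) (res : Bool) (cache : PySem.Dict String Bool) :
    PySem.Dict String Bool :=
  path.foldl (fun c q => c.insert q res) cache

-- B's reaches_task: walk up collecting the path, stop at falsy / missing / cached / task,
-- then cache the whole path with the result; fuel is enough on every input admitted by Pre_
def pvWalkB (d : PySem.Dict String (PySem.Dict String String)) :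
    Nat → Option String → List String → PySem.Dict String Bool →
    Bool × PySem.Dict String Bool
  | 0, _, _, cache => (false, cache)     -- fuel guard, never reached under Pre_
  | f + 1, pid, path, cache =>
    match pid with
    | none => (false, pvCommit path false cache)   -- res = cache.get(None, False) = False (cache has string keys)
    | some s =>
      if s = "" then (cache.getD s false, pvCommit path (cache.getD s false) cache)
      else
        match d.get? s with
        | none => (cache.getD s false, pvCommit path (cache.getD s false) cache)
        | some sp =>
          match cache.get? s with
          | some v => (v, pvCommit path v cache)   -- cache hit: res = cache.get(pid, False)
          | none =>
            if pvIsTask sp then (true, pvCommit path true cache)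
            else pvWalkB d f (sp.get? "parent_id") (s :: path) cache

def get_top_task_nodes_py_alt (spans_dict : List (String × List (String × String))) :
    List (List (String × String)) :=
  -- the comprehension, threading the mutable cache through the traversal of the values
  ((pvDictify spans_dict).values.foldl
    (fun st sp =>
      if pvIsTask sp then
        let r := pvWalkB (pvDictify spans_dict) (spans_dict.length + 2)
          (sp.get? "parent_id") [] st.2
        (if r.1 then st.1 else st.1 ++ [sp.items], r.2)
      else st)
    ([], PySem.Dict.empty)).1

-- ===== PRECONDITION & SPEC =====
-- one step of A's (and B's) parent walk: none = the walk stops here (falsy id, missing span, or a task span)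
def pvStepT (d : PySem.Dict String (PySem.Dict String String)) :
    Option String → Option String
  | none => none
  | some s =>
    if s = "" then none
    else
      match d.get? s with
      | none => none
      | some sp => if pvIsTask sp then none else sp.get? "parent_id"

-- Pre_ excludes exactly the inputs on which Python A LOOPS FOREVER (a parent cycle above a task
-- span that contains no task span): from each task span's parent, the walk step map must be
-- exhausted within (number of spans)+1 iterations — on every acyclic input this always holds.
def Pre_get_top_task_nodes_py (spans_dict : List (String × List (String × String))) : Prop :=
  ∀ sp ∈ (pvDictify spans_dict).values, pvIsTask sp = true →
    (pvStepT (pvDictify spans_dict))^[spans_dict.length + 1] (sp.get? "parent_id") = none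

instance (spans_dict : List (String × List (String × String))) :
    Decidable (Pre_get_top_task_nodes_py spans_dict) := by
  unfold Pre_get_top_task_nodes_py; infer_instance

def pvWitness_get_top_task_nodes_py : (List (String × List (String × String))) :=
  [("a", [("name", "task.run"), ("parent_id", "b")]), ("b", [("name", "root")])]

def Spec_get_top_task_nodes_py (spans_dict : List (String × List (String × String)))
    (out : List (List (String × String))) : Prop :=
  out = get_top_task_nodes_py_alt spans_dict

instance (spans_dict : List (String × List (String × String)))
    (out : List (List (String × String))) :
    Decidable (Spec_get_top_task_nodes_py spans_dict out) := by
  unfold Spec_get_top_task_nodes_py; infer_instance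

-- ===== CLAIM (what is proved, stated in full; the proofs are below) =====
def Claim_equal_get_top_task_nodes_py : Prop :=
  ∀ (spans_dict : List (String × List (String × String))),
    Dom_get_top_task_nodes_py spans_dict →
    Pre_get_top_task_nodes_py spans_dict →
    Spec_get_top_task_nodes_py spans_dict (get_top_task_nodes_py spans_dict)

-- ===== LEMMAS AND PROOFS =====

-- the value both walks compute: does the chain from pid (inclusive) reach a task span?
def pvReach (d : PySem.Dict String (PySem.Dict String String)) :
    Nat → Option String → Bool
  | 0, _ => false
  | f + 1, pid =>
    match pid with
    | none => false
    | some s =>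
      if s = "" then false
      else
        match d.get? s with
        | none => false
        | some sp => if pvIsTask sp then true else pvReach d f (sp.get? "parent_id")

theorem pvReach_none (d : PySem.Dict String (PySem.Dict String String)) (f : Nat) :
    pvReach d f none = false := by
  cases f <;> simp [pvReach]

theorem pvWalkA_eq_not_reach (d : PySem.Dict String (PySem.Dict String String)) :
    ∀ f pid, pvWalkA d f pid = !(pvReach d f pid) := by
  intro f
  induction f with
  | zero => intro pid; simp [pvWalkA, pvReach]
  | succ f ih =>
    intro pid
    cases pid with
    | none => simp [pvWalkA, pvReach]
    | some s =>
      by_cases hs : s = ""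
      · simp [pvWalkA, pvReach, hs]
      · cases hd : d.get? s with
        | none => simp [pvWalkA, pvReach, hs, hd]
        | some sp =>
          by_cases ht : pvIsTask sp
          · simp [pvWalkA, pvReach, hs, hd, ht]
          · simp [pvWalkA, pvReach, hs, hd, ht, ih]

-- once the walk step map is exhausted, pvReach no longer depends on the fuel
theorem pvReach_stable (d : PySem.Dict String (PySem.Dict String String)) :
    ∀ m pid, (pvStepT d)^[m] pid = none →
      ∀ g h, m ≤ g → m ≤ h → pvReach d g pid = pvReach d h pid := by
  intro m
  induction m with
  | zero =>
    intro pid hit g h _ _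
    simp only [Function.iterate_zero, id] at hit
    subst hit
    simp [pvReach_none]
  | succ m ih =>
    intro pid hit g h hg hh
    rw [Function.iterate_succ_apply] at hit
    cases pid with
    | none => simp [pvReach_none]
    | some s =>
      by_cases hs : s = ""
      · cases g <;> cases h <;> simp [pvReach, hs]
      · cases hd : d.get? s with
        | none => cases g <;> cases h <;> simp [pvReach, hd, hs]
        | some sp =>
          by_cases ht : pvIsTask sp
          · obtain ⟨g', rfl⟩ : ∃ g', g = g' + 1 := ⟨g - 1, by omega⟩
            obtain ⟨h', rfl⟩ : ∃ h', h = h' + 1 := ⟨h - 1, by omega⟩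
            simp [pvReach, hd, hs, ht]
          · obtain ⟨g', rfl⟩ : ∃ g', g = g' + 1 := ⟨g - 1, by omega⟩
            obtain ⟨h', rfl⟩ : ∃ h', h = h' + 1 := ⟨h - 1, by omega⟩
            have hstep : pvStepT d (some s) = sp.get? "parent_id" := by
              simp [pvStepT, hs, hd, ht]
            rw [hstep] at hit
            simp only [pvReach, hs, hd, ht, if_false]
            exact ih _ hit g' h' (by omega) (by omega)

-- the cache invariant: every cached value is the true "reaches a task span" answer
def pvInv (d : PySem.Dict String (PySem.Dict String String)) (Nf : Nat)
    (cache : PySem.Dict String Bool) : Prop :=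
  ∀ k v, cache.get? k = some v → v = pvReach d (Nf + 2) (some k)

theorem pvCommit_inv (d : PySem.Dict String (PySem.Dict String String)) (Nf : Nat) (r : Bool) :
    ∀ path cache, pvInv d Nf cache →
      (∀ q ∈ path, pvReach d (Nf + 2) (some q) = r) →
      pvInv d Nf (pvCommit path r cache) := by
  intro path
  induction path with
  | nil => intro cache hc _; simpa [pvCommit] using hc
  | cons q path ih =>
    intro cache hc hp
    have : pvCommit (q :: path) r cache = pvCommit path r (cache.insert q r) := rfl
    rw [this]
    apply ih
    · intro k v hk
      rw [PySem.Dict.get?_insert] at hk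
      split at hk
      · cases hk
        exact (hp q (by simp)).symm.trans (by simp_all)
      · exact hc k v hk
    · intro q' hq'; exact hp q' (by simp [hq'])

theorem pvWalkB_spec (d : PySem.Dict String (PySem.Dict String String)) (Nf : Nat) :
    ∀ f, f ≤ Nf + 1 → ∀ pid path cache,
      (pvStepT d)^[f] pid = none →
      pvInv d Nf cache →
      (∀ q ∈ path, pvReach d (Nf + 2) (some q) = pvReach d (Nf + 2) pid) →
      (pvWalkB d (f + 1) pid path cache).1 = pvReach d (Nf + 2) pid ∧
      pvInv d Nf (pvWalkB d (f + 1) pid path cache).2 := by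
  intro f
  induction f with
  | zero =>
    intro _ pid path cache hit hc hp
    simp only [Function.iterate_zero, id] at hit
    subst hit
    refine ⟨by simp [pvWalkB, pvReach_none], ?_⟩
    exact pvCommit_inv d Nf false path cache hc (by simpa [pvReach_none] using hp)
  | succ f ih =>
    intro hf pid path cache hit hc hp
    cases pid with
    | none =>
      refine ⟨by simp [pvWalkB, pvReach_none], ?_⟩
      exact pvCommit_inv d Nf false path cache hc (by simpa [pvReach_none] using hp)
    | some s =>
      by_cases hs : s = ""
      · subst hs
        have hR : pvReach d (Nf + 2) (some "") = false := by simp [pvReach]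
        have hres : cache.getD "" false = false := by
          rw [PySem.Dict.getD_eq_get?_getD]
          cases hcv : cache.get? "" with
          | none => rfl
          | some v => simpa [hR] using hc _ v hcv
        refine ⟨by simp [pvWalkB, hres, hR], ?_⟩
        have : (pvWalkB d (f + 1 + 1) (some "") path cache).2
            = pvCommit path (cache.getD "" false) cache := by simp [pvWalkB]
        rw [this, hres]
        exact pvCommit_inv d Nf false path cache hc (by simpa [hR] using hp)
      · cases hd : d.get? s with
        | none =>
          have hR : pvReach d (Nf + 2) (some s) = false := by simp [pvReach, hs, hd]
          have hres : cache.getD s false = false := by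
            rw [PySem.Dict.getD_eq_get?_getD]
            cases hcv : cache.get? s with
            | none => rfl
            | some v => simpa [hR] using hc s v hcv
          refine ⟨by simp [pvWalkB, hs, hd, hres, hR], ?_⟩
          have : (pvWalkB d (f + 1 + 1) (some s) path cache).2
              = pvCommit path (cache.getD s false) cache := by simp [pvWalkB, hs, hd]
          rw [this, hres]
          exact pvCommit_inv d Nf false path cache hc (by simpa [hR] using hp)
        | some sp =>
          cases hcc : cache.get? s with
          | some v =>
            have hv : v = pvReach d (Nf + 2) (some s) := hc s v hcc
            refine ⟨by simp [pvWalkB, hs, hd, hcc, hv], ?_⟩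
            have : (pvWalkB d (f + 1 + 1) (some s) path cache).2
                = pvCommit path v cache := by simp [pvWalkB, hs, hd, hcc]
            rw [this]
            exact pvCommit_inv d Nf v path cache hc (by intro q hq; rw [hp q hq, hv])
          | none =>
            by_cases ht : pvIsTask sp
            · have hR : pvReach d (Nf + 2) (some s) = true := by simp [pvReach, hs, hd, ht]
              refine ⟨by simp [pvWalkB, hs, hd, hcc, ht, hR], ?_⟩
              have : (pvWalkB d (f + 1 + 1) (some s) path cache).2
                  = pvCommit path true cache := by simp [pvWalkB, hs, hd, hcc, ht]
              rw [this]
              exact pvCommit_inv d Nf true path cache hc (by simpa [hR] using hp)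
            · rw [Function.iterate_succ_apply] at hit
              have hstep : pvStepT d (some s) = sp.get? "parent_id" := by
                simp [pvStepT, hs, hd, ht]
              rw [hstep] at hit
              have hRs : pvReach d (Nf + 2) (some s)
                  = pvReach d (Nf + 2) (sp.get? "parent_id") := by
                have h1 : pvReach d (Nf + 2) (some s)
                    = pvReach d (Nf + 1) (sp.get? "parent_id") := by
                  simp [pvReach, hs, hd, ht]
                rw [h1]
                exact pvReach_stable d f _ hit (Nf + 1) (Nf + 2) (by omega) (by omega)
              have hrec : pvWalkB d (f + 1 + 1) (some s) path cache
                  = pvWalkB d (f + 1) (sp.get? "parent_id") (s :: path) cache := by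
                simp [pvWalkB, hs, hd, hcc, ht]
              rw [hrec]
              have := ih (by omega) (sp.get? "parent_id") (s :: path) cache hit hc
                (by
                  intro q hq
                  rcases List.mem_cons.mp hq with h | h
                  · subst h; exact hRs
                  · rw [hp q h, hRs])
              exact ⟨this.1.trans hRs.symm, this.2⟩

theorem pvFoldB_spec (d : PySem.Dict String (PySem.Dict String String)) (Nf : Nat) :
    ∀ (l : List (PySem.Dict String String)) (acc : List (List (String × String)))
      (cache : PySem.Dict String Bool),
      pvInv d Nf cache →
      (∀ sp ∈ l, pvIsTask sp = true →
        (pvStepT d)^[Nf + 1] (sp.get? "parent_id") = none) →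
      (l.foldl
        (fun st sp =>
          if pvIsTask sp then
            let r := pvWalkB d (Nf + 2) (sp.get? "parent_id") [] st.2
            (if r.1 then st.1 else st.1 ++ [sp.items], r.2)
          else st)
        (acc, cache)).1
      = acc ++ (l.filter
          (fun sp => pvIsTask sp && !(pvReach d (Nf + 2) (sp.get? "parent_id")))).map
            (fun sp => sp.items) := by
  intro l
  induction l with
  | nil => intro acc cache _ _; simp
  | cons sp l ih =>
    intro acc cache hc hl
    have hw := pvWalkB_spec d Nf (Nf + 1) (le_refl _) (sp.get? "parent_id") [] cache
    simp only [List.foldl_cons, List.filter_cons]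
    by_cases ht : pvIsTask sp
    · have hstep := hl sp (by simp) ht
      have hw' := hw hstep hc (by simp)
      cases hR : pvReach d (Nf + 2) (sp.get? "parent_id") with
      | false =>
        have h1 : (pvWalkB d (Nf + 2) (sp.get? "parent_id") [] cache).1 = false := by
          rw [hw'.1, hR]
        simp only [ht, if_true, h1, Bool.false_eq_true, if_false, Bool.not_false,
          Bool.and_self, List.map_cons]
        rw [ih (acc ++ [sp.items]) _ hw'.2 (fun x hx => hl x (by simp [hx]))]
        simp
      | true =>
        have h1 : (pvWalkB d (Nf + 2) (sp.get? "parent_id") [] cache).1 = true := by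
          rw [hw'.1, hR]
        simp only [ht, if_true, h1, Bool.not_true, Bool.and_false]
        exact ih acc _ hw'.2 (fun x hx => hl x (by simp [hx]))
    · simp only [ht, Bool.false_and]
      exact ih acc cache hc (fun x hx => hl x (by simp [hx]))

theorem get_top_task_nodes_py_spec : Claim_equal_get_top_task_nodes_py := by
  intro sd _ hpre
  show get_top_task_nodes_py sd = get_top_task_nodes_py_alt sd
  unfold get_top_task_nodes_py get_top_task_nodes_py_alt
  rw [PySem.List.foldl_append_if, List.filter_filter,
    pvFoldB_spec (pvDictify sd) sd.length _ [] PySem.Dict.empty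
      (by intro k v h; simp [PySem.Dict.get?_empty] at h) hpre]
  simp only [List.nil_append]
  congr 1
  apply List.filter_congr
  intro sp _
  rw [pvWalkA_eq_not_reach]
  exact Bool.and_comm _ _
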